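-- pv_equiv track=rewrite | github.com/cecilia-uu/LeetCode | OA/amazon/dominance_of_prefix.py | findDominance
-- ===== SOURCE A (Python) =====
-- from collections import defaultdict
--
-- def findDominance(s):
--     m = len(s[0])  # Length of each string (assuming all strings have the same length)
--     result = []
--
--     # For each prefix length from 1 to m
--     for length in range(1, m + 1):
--         prefix_count = defaultdict(int)
--
--         # Count occurrences of each prefix of the current length
--         for string in s:
--             prefix = string[:length]
--             prefix_count[prefix] += 1
--
--         # Find the maximum dominance for this prefix length
--         max_dominance = max(prefix_count.values())
--         result.append(max_dominance)
--
--     return result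
-- ===== SOURCE B (Python) =====
-- def findDominance(s):
--     m = len(s[0])
--     result = []
--     best_ended = 0
--     groups = [list(s)]
--     for depth in range(m):
--         new_groups = []
--         for g in groups:
--             buckets = {}
--             ended = 0
--             for st in g:
--                 if len(st) <= depth:
--                     ended += 1
--                 else:
--                     buckets.setdefault(st[depth], []).append(st)
--             if ended > best_ended:
--                 best_ended = ended
--             new_groups.extend(buckets.values())
--         groups = new_groups
--         level_best = best_ended
--         for g in groups:
--             if len(g) > level_best:
--                 level_best = len(g)
--         result.append(level_best)
--     return result
-- ===== Notes on version B (the rewrite author's own statement) =====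
-- stated objective: alternative
-- what changed: Instead of rescanning all strings for every prefix length and hashing a freshly-sliced length-L prefix each time (O(n*m^2) character operations), B refines prefix groups level by level like a trie (bucketing each group by its next character) and keeps a running maximum of the multiplicities of already-ended strings, touching each character once (O(n*m) character operations); in CPython A's slicing is C-level, so the wall-clock gain is input-dependent and not claimed.
import Mathlib
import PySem

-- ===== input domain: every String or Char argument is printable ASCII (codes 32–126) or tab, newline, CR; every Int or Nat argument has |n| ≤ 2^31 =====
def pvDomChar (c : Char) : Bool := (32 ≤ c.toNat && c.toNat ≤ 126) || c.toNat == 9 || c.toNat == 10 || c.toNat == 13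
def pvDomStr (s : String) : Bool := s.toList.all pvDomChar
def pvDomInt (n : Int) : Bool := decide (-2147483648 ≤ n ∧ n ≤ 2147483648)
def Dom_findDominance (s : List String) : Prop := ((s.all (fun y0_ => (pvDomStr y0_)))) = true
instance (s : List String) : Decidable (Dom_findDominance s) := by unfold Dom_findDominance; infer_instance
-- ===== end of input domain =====

-- B replaces A's per-length full rescan (hashing a freshly sliced length-L prefix of every string for
-- every L) by one level-by-level trie-style refinement of prefix groups with a running maximum for
-- already-ended strings: a different algorithm over the same data.

-- ===== PORT A =====
def findDominance (s : List String) : List Int :=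
  match s with
  | [] => []   -- Python: len(s[0]) raises IndexError here; excluded by Pre_findDominance
  | s0 :: _ =>
    let m : Int := PySem.Str.len s0
    (PySem.List.pyRange 1 (m + 1) 1).foldl
      (fun result length =>
        let prefix_count : PySem.Dict String Int :=
          s.foldl (fun d str =>
            d.modify (PySem.Str.slice str none (some length)) 0 (· + 1)) PySem.Dict.empty
        let max_dominance : Int :=
          (PySem.List.max? prefix_count.values (fun v => v)).getD 0
        result ++ [max_dominance])
      []

-- ===== PORT B =====
def findDominance_alt (s : List String) : List Int :=
  match s with
  | [] => []   -- Python: len(s[0]) raises IndexError here; excluded by Pre_findDominance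
  | s0 :: _ =>
    let m : Int := PySem.Str.len s0
    (PySem.List.pyRange 0 m 1).foldl
      (fun (st : List Int × Int × List (List String)) depth =>
        let result := st.1
        let best_ended := st.2.1
        let groups := st.2.2
        let bg :=
          groups.foldl
            (fun (acc : Int × List (List String)) g =>
              let be :=
                g.foldl
                  (fun (be : PySem.Dict Char (List String) × Int) t =>
                    if PySem.Str.len t ≤ depth then (be.1, be.2 + 1)
                    else
                      -- st[depth]: in this branch depth < len(t), so pyGet? is some; getD is exact
                      (be.1.modify ((PySem.Str.pyGet? t depth).getD ' ') [] (· ++ [t]), be.2))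
                  (PySem.Dict.empty, 0)
              (if be.2 > acc.1 then be.2 else acc.1, acc.2 ++ be.1.values))
            (best_ended, [])
        let new_groups := bg.2
        let level_best :=
          new_groups.foldl
            (fun lb g => if (g.length : Int) > lb then (g.length : Int) else lb) bg.1
        (result ++ [level_best], bg.1, new_groups))
      ([], 0, [s])
    |>.1

-- ===== PRECONDITION & SPEC =====
-- Pre_ excludes only the empty list, on which the Python A raises IndexError at s[0].
def Pre_findDominance (s : List String) : Prop := s ≠ []
instance (s : List String) : Decidable (Pre_findDominance s) := by unfold Pre_findDominance; infer_instance
def pvWitness_findDominance : List String := (["ab", "ac", "a"])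
def Spec_findDominance (s : List String) (out : List Int) : Prop := out = findDominance_alt s
instance (s : List String) (out : List Int) : Decidable (Spec_findDominance s out) := by unfold Spec_findDominance; infer_instance

-- ===== CLAIM (what is proved, stated in full; the proofs are below) =====
def Claim_equal_findDominance : Prop := ∀ (s : List String), Dom_findDominance s → Pre_findDominance s → Spec_findDominance s (findDominance s)

-- ===== LEMMAS AND PROOFS =====

def pvKey (d : Nat) (u : String) : String := PySem.Str.slice u none (some (1 + (d : Nat)))
def pvKs (s : List String) (d : Nat) : List String := s.map (pvKey d)
def pvCls (s : List String) (d : Nat) (p : List Char) : List String :=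
  s.filter (fun u => decide (d ≤ u.toList.length ∧ u.toList.take d = p))
def pvEnd (s : List String) (p : List Char) : Nat := s.countP (fun u => u.toList == p)
lemma toList_pvKey (d : Nat) (u : String) : (pvKey d u).toList = u.toList.take (d + 1) := by
  simp only [pvKey, PySem.Str.slice]
  rw [show (1 + (d:Int)) = (d:Int) + 1 from by ring]
  rw [show (String.ofList (PySem.Chars.slice u.toList none (some ((d:Int) + 1)))).toList
        = PySem.List.slice u.toList none (some ((d:Int) + 1)) from by simp]
  rw [PySem.List.slice_to u.toList (show (0:Int) ≤ (d:Int)+1 by positivity)]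
  congr 1
lemma pvKey_short {d : Nat} {u : String} (h : u.toList.length ≤ d) : pvKey d u = u := by
  apply String.toList_inj.mp
  rw [toList_pvKey]
  exact List.take_of_length_le (by omega)

lemma pvKey_eq_iff {d : Nat} {u v : String} (hu : d + 1 ≤ u.toList.length) :
    pvKey d v = pvKey d u ↔ d + 1 ≤ v.toList.length ∧ v.toList.take (d+1) = u.toList.take (d+1) := by
  constructor
  · intro h
    have h' := congrArg String.toList h
    rw [toList_pvKey, toList_pvKey] at h'
    have hlen := congrArg List.length h'
    rw [List.length_take, List.length_take] at hlen
    exact ⟨by omega, h'⟩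
  · rintro ⟨h1, h2⟩
    apply String.toList_inj.mp
    rw [toList_pvKey, toList_pvKey]
    exact h2

lemma count_key_short {d : Nat} {u : String} (s : List String) (h : u.toList.length ≤ d) :
    (pvKs s d).count u = s.count u := by
  unfold pvKs
  rw [List.count_eq_countP, List.count_eq_countP, List.countP_map]
  apply List.countP_congr
  intro v _
  simp only [Function.comp, beq_iff_eq]
  constructor
  · intro hk
    by_cases hv : v.toList.length ≤ d
    · rwa [pvKey_short hv] at hk
    · exfalso
      have h' := congrArg String.toList hk
      rw [toList_pvKey] at h'
      have hlen := congrArg List.length h'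
      rw [List.length_take] at hlen
      omega
  · intro hk
    subst hk
    exact pvKey_short h
lemma count_key_long {d : Nat} {u : String} (s : List String) (h : d + 1 ≤ u.toList.length) :
    (pvKs s d).count (pvKey d u) = (pvCls s (d + 1) (u.toList.take (d + 1))).length := by
  unfold pvKs pvCls
  rw [List.count_eq_countP, List.countP_map, ← List.countP_eq_length_filter]
  apply List.countP_congr
  intro v _
  simp only [Function.comp, beq_iff_eq, decide_eq_true_iff]
  exact pvKey_eq_iff h
lemma count_eq_pvEnd (s : List String) (u : String) : s.count u = pvEnd s u.toList := by
  unfold pvEnd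
  rw [List.count_eq_countP]
  apply List.countP_congr
  intro v _
  simp [String.toList_inj]
lemma mem_pvCls {s : List String} {d : Nat} {p : List Char} {u : String} :
    u ∈ pvCls s d p ↔ u ∈ s ∧ d ≤ u.toList.length ∧ u.toList.take d = p := by
  simp [pvCls, List.mem_filter]
def pvIsMax (ks : List String) (a : Int) : Prop :=
  (∃ k ∈ ks, a = (ks.count k : Int)) ∧ ∀ k ∈ ks, (ks.count k : Int) ≤ a
def pvAval (s : List String) (d : Nat) : Int :=
  (PySem.List.max? (PySem.Dict.counter (pvKs s d)).values (fun v => v)).getD 0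
lemma pvIsMax_unique {ks : List String} {a b : Int} (ha : pvIsMax ks a) (hb : pvIsMax ks b) :
    a = b := by
  obtain ⟨⟨k, hk, hak⟩, hub⟩ := ha
  obtain ⟨⟨k', hk', hbk⟩, hub'⟩ := hb
  have h1 : a ≤ b := hak ▸ hub' k hk
  have h2 : b ≤ a := hbk ▸ hub k' hk'
  omega
lemma pvAval_isMax (s : List String) (hne : s ≠ []) (d : Nat) : pvIsMax (pvKs s d) (pvAval s d) := by
  have hks : pvKs s d ≠ [] := by
    unfold pvKs; simpa using hne
  have hvals : (PySem.Dict.counter (pvKs s d)).values =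
      ((PySem.Dict.counter (pvKs s d)).keys).map (fun k => (PySem.Dict.counter (pvKs s d)).getD k 0) :=
    PySem.Dict.values_eq_map_keys _ (PySem.Dict.nodup_keys_counter _) 0
  have hkeys : (PySem.Dict.counter (pvKs s d)).keys = PySem.Set.ofList (pvKs s d) :=
    PySem.Dict.keys_counter _
  have hvne : (PySem.Dict.counter (pvKs s d)).values ≠ [] := by
    rw [hvals, hkeys]
    intro hc
    rcases List.exists_mem_of_ne_nil _ hks with ⟨k, hk⟩
    have : k ∈ PySem.Set.ofList (pvKs s d) := (PySem.Set.mem_ofList _ _).mpr hk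
    rw [List.map_eq_nil_iff.mp hc] at this
    simp at this
  obtain ⟨a, hsome⟩ : ∃ a, PySem.List.max? (PySem.Dict.counter (pvKs s d)).values (fun v => v) = some a := by
    cases hmax : PySem.List.max? (PySem.Dict.counter (pvKs s d)).values (fun v => v) with
    | none => exact absurd ((PySem.List.max?_eq_none_iff _ _).mp hmax) hvne
    | some a => exact ⟨a, rfl⟩
  have hmem := PySem.List.max?_mem hsome
  have hmax := PySem.List.max?_isMax hsome
  unfold pvAval
  rw [hsome]
  constructor
  · rw [hvals, hkeys] at hmem
    rcases List.mem_map.mp hmem with ⟨k, hk, hka⟩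
    refine ⟨k, (PySem.Set.mem_ofList _ _).mp hk, ?_⟩
    rw [← hka, PySem.Dict.getD_counter]
    simp
  · intro k hk
    have : (PySem.Dict.counter (pvKs s d)).getD k 0 ∈ (PySem.Dict.counter (pvKs s d)).values := by
      rw [hvals, hkeys]
      exact List.mem_map_of_mem ((PySem.Set.mem_ofList _ _).mpr hk)
    have := hmax _ this
    rwa [PySem.Dict.getD_counter] at this
lemma A_char (s0 : String) (t : List String) :
    findDominance (s0 :: t) =
      (List.range s0.toList.length).map (fun d => pvAval (s0 :: t) d) := by
  show (PySem.List.pyRange 1 (PySem.Str.len s0 + 1) 1).foldl _ [] = _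
  rw [PySem.List.pyRange_one]
  rw [show (PySem.Str.len s0 + 1 - 1) = ((s0.toList.length : Nat) : Int) from by
        rw [PySem.Str.len_eq]; ring]
  rw [Int.toNat_natCast]
  have hfun : (fun (result : List Int) (length : Int) =>
        let prefix_count : PySem.Dict String Int :=
          (s0 :: t).foldl (fun d str =>
            d.modify (PySem.Str.slice str none (some length)) 0 (· + 1)) PySem.Dict.empty
        let max_dominance : Int :=
          (PySem.List.max? prefix_count.values (fun v => v)).getD 0
        result ++ [max_dominance])
      = (fun (result : List Int) (length : Int) =>
          result ++ [(PySem.List.max? ((s0 :: t).foldl (fun d str =>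
            d.modify (PySem.Str.slice str none (some length)) 0 (· + 1)) PySem.Dict.empty).values
            (fun v => v)).getD 0]) := rfl
  rw [hfun]
  rw [PySem.List.foldl_append_singleton_eq_map]
  rw [List.map_map]
  apply List.map_congr_left
  intro d _
  show (PySem.List.max? _ _).getD 0 = pvAval (s0 :: t) d
  unfold pvAval
  congr 2
  rw [PySem.Dict.counter_eq_foldl]
  unfold pvKs
  rw [List.foldl_map]
  rfl
def pvE (j : Nat) (g : List String) : Int :=
  (g.foldl
    (fun (be : PySem.Dict Char (List String) × Int) t =>
      if PySem.Str.len t ≤ (j : Int) then (be.1, be.2 + 1)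
      else (be.1.modify ((PySem.Str.pyGet? t (j : Int)).getD ' ') [] (· ++ [t]), be.2))
    (PySem.Dict.empty, 0)).2
def pvV (j : Nat) (g : List String) : List (List String) :=
  (g.foldl
    (fun (be : PySem.Dict Char (List String) × Int) t =>
      if PySem.Str.len t ≤ (j : Int) then (be.1, be.2 + 1)
      else (be.1.modify ((PySem.Str.pyGet? t (j : Int)).getD ' ') [] (· ++ [t]), be.2))
    (PySem.Dict.empty, 0)).1.values
lemma pair_fold_split (j : Nat) (l : List String) (D : PySem.Dict Char (List String)) (E : Int) :
    l.foldl
      (fun (be : PySem.Dict Char (List String) × Int) t =>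
        if PySem.Str.len t ≤ (j : Int) then (be.1, be.2 + 1)
        else (be.1.modify ((PySem.Str.pyGet? t (j : Int)).getD ' ') [] (· ++ [t]), be.2))
      (D, E)
    = ((l.filter (fun t => !decide (t.toList.length ≤ j))).foldl
         (fun d t => d.modify ((PySem.Str.pyGet? t (j : Int)).getD ' ') [] (· ++ [t])) D,
       E + (l.countP (fun t => decide (t.toList.length ≤ j)) : Int)) := by
  induction l generalizing D E with
  | nil => simp
  | cons t l ih =>
    rw [List.foldl_cons]
    by_cases h : t.toList.length ≤ j
    · rw [if_pos (by rw [PySem.Str.len_eq]; exact_mod_cast h)]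
      rw [ih]
      rw [List.filter_cons_of_neg (by simpa using h), List.countP_cons_of_pos (by simpa using h)]
      simp only [Prod.mk.injEq]
      exact ⟨trivial, by push_cast; ring⟩
    · rw [if_neg (by rw [PySem.Str.len_eq]; exact_mod_cast h)]
      rw [ih]
      rw [List.filter_cons_of_pos (by simpa using h), List.countP_cons_of_neg (by simpa using h)]
      simp

lemma pvE_eq {s : List String} {j : Nat} {p : List Char} (hp : p.length = j) :
    pvE j (pvCls s j p) = (pvEnd s p : Int) := by
  unfold pvE
  rw [pair_fold_split]
  simp only [zero_add]
  congr 1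
  unfold pvCls pvEnd
  rw [List.countP_filter]
  apply List.countP_congr
  intro u _
  simp only [Bool.and_eq_true, decide_eq_true_iff, beq_iff_eq]
  constructor
  · rintro ⟨h1, ⟨h2, h3⟩⟩
    rw [← h3]
    exact (List.take_of_length_le (by omega)).symm
  · intro h
    have hl : u.toList.length = j := by rw [h]; exact hp
    exact ⟨by omega, by omega, by rw [List.take_of_length_le (by omega)]; exact h⟩


lemma bucket_core (j : Nat) (p : List Char) (hp : p.length = j) (c : Char) (u : String) :
    (u.toList[j]?.getD ' ' = c ∧ j < u.toList.length) ∧ j ≤ u.toList.length ∧ List.take j u.toList = p ↔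
    j + 1 ≤ u.toList.length ∧ List.take (j + 1) u.toList = p ++ [c] := by
  constructor
  · rintro ⟨⟨hc, hj⟩, _, htake⟩
    refine ⟨by omega, ?_⟩
    rw [List.take_add_one, htake]
    have hg : u.toList[j]? = some (u.toList[j]'(by omega)) := List.getElem?_eq_getElem (by omega)
    rw [hg] at hc ⊢
    simp only [Option.getD_some] at hc
    simp [hc]
  · rintro ⟨h1, h2⟩
    have htj : u.toList.take j = p := by
      have h3 := congrArg (List.take j) h2
      rw [List.take_take, Nat.min_def, if_pos (by omega)] at h3
      rw [h3, List.take_append_of_le_length (by omega), List.take_of_length_le (by omega)]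
    have hcj : u.toList[j]? = some c := by
      have h4 := congrArg (fun l => l[j]?) h2
      simp only at h4
      rw [List.getElem?_take, if_pos (by omega)] at h4
      rw [h4, List.getElem?_append_right (by omega)]
      simp [hp]
    exact ⟨⟨by rw [hcj]; rfl, by omega⟩, by omega, htj⟩

lemma bucket_eq {s : List String} {j : Nat} {p : List Char} (hp : p.length = j) (c : Char) :
    ((pvCls s j p).filter (fun t => !decide (t.toList.length ≤ j))).filter
        (fun t => ((PySem.Str.pyGet? t (j : Int)).getD ' ') == c)
      = pvCls s (j + 1) (p ++ [c]) := by
  unfold pvCls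
  rw [List.filter_filter, List.filter_filter]
  apply List.filter_congr
  intro u _
  rw [Bool.eq_iff_iff]
  simp only [Bool.and_eq_true, decide_eq_true_iff, beq_iff_eq, Bool.not_eq_eq_eq_not,
    Bool.not_true, decide_eq_false_iff_not, not_le, PySem.Str.pyGet?_natCast]
  exact bucket_core j p hp c u

lemma pvV_eq {s : List String} {j : Nat} {p : List Char} (hp : p.length = j) :
    pvV j (pvCls s j p)
      = (PySem.Set.ofList
            (((pvCls s j p).filter (fun t => !decide (t.toList.length ≤ j))).map
              (fun t => (PySem.Str.pyGet? t (j : Int)).getD ' '))).map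
          (fun c => pvCls s (j + 1) (p ++ [c])) := by
  unfold pvV
  rw [pair_fold_split]
  set l := (pvCls s j p).filter (fun t => !decide (t.toList.length ≤ j)) with hl
  have hnodup : (l.foldl (fun d t =>
      d.modify ((PySem.Str.pyGet? t (j : Int)).getD ' ') [] (· ++ [t])) PySem.Dict.empty).keys.Nodup := by
    apply PySem.Dict.nodup_keys_foldl_modify_key l (fun t => (PySem.Str.pyGet? t (j : Int)).getD ' ') []
      (fun _ t v => v ++ [t])
    rw [PySem.Dict.keys_empty]
    exact List.nodup_nil
  have hkeys : (l.foldl (fun d t =>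
      d.modify ((PySem.Str.pyGet? t (j : Int)).getD ' ') [] (· ++ [t])) PySem.Dict.empty).keys
      = PySem.Set.ofList (l.map (fun t => (PySem.Str.pyGet? t (j : Int)).getD ' ')) := by
    rw [PySem.Dict.keys_foldl_modify_key l (fun t => (PySem.Str.pyGet? t (j : Int)).getD ' ') []
      (fun _ t v => v ++ [t]), PySem.Dict.keys_empty, PySem.Set.update_nil_left]
  rw [PySem.Dict.values_eq_map_keys _ hnodup [], hkeys]
  apply List.map_congr_left
  intro c _
  -- the bucket for key c is the filtered sublist with that first character
  have hfold : l.foldl (fun d t =>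
      d.modify ((PySem.Str.pyGet? t (j : Int)).getD ' ') [] (· ++ [t])) PySem.Dict.empty
      = (l.map (fun t => ((PySem.Str.pyGet? t (j : Int)).getD ' ', t))).foldl
          (fun d pr => d.modify pr.1 [] (· ++ [pr.2])) PySem.Dict.empty := by
    rw [List.foldl_map]
  rw [hfold, PySem.Dict.getD_foldl_modify_append, PySem.Dict.getD_empty, List.nil_append]
  rw [List.filter_map, List.map_map]
  have hid : ((fun (pr : Char × String) => pr.2) ∘ (fun t => ((PySem.Str.pyGet? t (j : Int)).getD ' ', t)))
      = id := rfl
  rw [hid, List.map_id]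
  have hpred : ((fun (pr : Char × String) => pr.1 == c) ∘ (fun t => ((PySem.Str.pyGet? t (j : Int)).getD ' ', t)))
      = (fun t => ((PySem.Str.pyGet? t (j : Int)).getD ' ') == c) := rfl
  rw [hpred, hl]
  exact bucket_eq hp c
lemma if_gt_eq_max (a x : Int) : (if x > a then x else a) = max a x := by
  rw [max_def]; split_ifs <;> omega

lemma body_eq (j : Nat) (b : Int) (G : List (List String)) :
    G.foldl
      (fun (acc : Int × List (List String)) g =>
        let be :=
          g.foldl
            (fun (be : PySem.Dict Char (List String) × Int) t =>
              if PySem.Str.len t ≤ (j : Int) then (be.1, be.2 + 1)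
              else (be.1.modify ((PySem.Str.pyGet? t (j : Int)).getD ' ') [] (· ++ [t]), be.2))
            (PySem.Dict.empty, 0)
        (if be.2 > acc.1 then be.2 else acc.1, acc.2 ++ be.1.values))
      (b, [])
    = (G.foldl (fun a g => max a (pvE j g)) b, G.flatMap (pvV j)) := by
  have hb : (fun (acc : Int × List (List String)) g =>
        let be :=
          g.foldl
            (fun (be : PySem.Dict Char (List String) × Int) t =>
              if PySem.Str.len t ≤ (j : Int) then (be.1, be.2 + 1)
              else (be.1.modify ((PySem.Str.pyGet? t (j : Int)).getD ' ') [] (· ++ [t]), be.2))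
            (PySem.Dict.empty, 0)
        (if be.2 > acc.1 then be.2 else acc.1, acc.2 ++ be.1.values))
      = (fun (acc : Int × List (List String)) g => (max acc.1 (pvE j g), acc.2 ++ pvV j g)) := by
    funext acc g
    show (_, _) = _
    rw [if_gt_eq_max]
    rfl
  rw [hb]
  rw [PySem.List.foldl_prod_mk (fun a g => max a (pvE j g)) (fun l2 g => l2 ++ pvV j g) G b []]
  rw [PySem.List.foldl_append_eq_flatMap]
  simp
def pvBestInv (s : List String) (j : Nat) (b : Int) : Prop :=
  0 ≤ b ∧ (∀ u ∈ s, u.toList.length < j → (s.count u : Int) ≤ b) ∧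
    (b = 0 ∨ ∃ u ∈ s, u.toList.length < j ∧ b = (s.count u : Int))
def pvGroupsInv (s : List String) (j : Nat) (G : List (List String)) : Prop :=
  (∀ g ∈ G, g ≠ [] ∧ ∃ p : List Char, p.length = j ∧ g = pvCls s j p) ∧
    (∀ u ∈ s, j ≤ u.toList.length → ∃ g ∈ G, u ∈ g)

lemma step_best (s : List String) (j : Nat) (b : Int) (G : List (List String))
    (hB : pvBestInv s j b) (hG : pvGroupsInv s j G) :
    pvBestInv s (j + 1) (G.foldl (fun a g => max a (pvE j g)) b) := by
  obtain ⟨hb0, hbd, hbw⟩ := hB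
  obtain ⟨hGa, hGb⟩ := hG
  have hle := PySem.List.le_foldl_max_int G (pvE j) b
  set b' := G.foldl (fun a g => max a (pvE j g)) b with hb'
  refine ⟨le_trans hb0 hle.1, ?_, ?_⟩
  · intro u hu hlen
    by_cases hcase : u.toList.length < j
    · exact le_trans (hbd u hu hcase) hle.1
    · have hj : j ≤ u.toList.length := by omega
      obtain ⟨g, hgG, hug⟩ := hGb u hu hj
      obtain ⟨_, p, hp, hgcls⟩ := hGa g hgG
      have hup : u.toList.take j = p := (mem_pvCls.mp (hgcls ▸ hug)).2.2
      have hpu : p = u.toList := by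
        rw [← hup, List.take_of_length_le (by omega)]
      have hE : pvE j g = (pvEnd s p : Int) := by rw [hgcls]; exact pvE_eq hp
      have : (s.count u : Int) = pvE j g := by
        rw [hE, hpu, count_eq_pvEnd]
      rw [this]
      exact hle.2 g hgG
  · have hmem : b' = b ∨ b' ∈ G.map (pvE j) := by
      rw [hb', ← List.foldl_map]
      exact PySem.List.foldl_max_mem _ _
    rcases hmem with h | h
    · rcases hbw with h0 | ⟨u, hu, hl, he⟩
      · exact Or.inl (by omega)
      · exact Or.inr ⟨u, hu, by omega, by omega⟩
    · obtain ⟨g, hgG, hge⟩ := List.mem_map.mp h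
      obtain ⟨_, p, hp, hgcls⟩ := hGa g hgG
      have hE : pvE j g = (pvEnd s p : Int) := by rw [hgcls]; exact pvE_eq hp
      by_cases hz : pvEnd s p = 0
      · exact Or.inl (by omega)
      · have hpos : 0 < s.countP (fun u => u.toList == p) := by
          unfold pvEnd at hz; omega
        obtain ⟨u, hu, hup⟩ := List.countP_pos_iff.mp hpos
        have hupl : u.toList = p := by simpa using hup
        refine Or.inr ⟨u, hu, by rw [hupl]; omega, ?_⟩
        rw [count_eq_pvEnd, hupl]
        omega
lemma mem_bucket {s : List String} {j : Nat} {p : List Char} (hp : p.length = j) (c : Char)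
    {t : String}
    (ht : t ∈ (pvCls s j p).filter (fun t => !decide (t.toList.length ≤ j)))
    (hc : (PySem.Str.pyGet? t (j : Int)).getD ' ' = c) :
    t ∈ pvCls s (j + 1) (p ++ [c]) := by
  rw [← bucket_eq hp c]
  refine List.mem_filter.mpr ⟨ht, ?_⟩
  rw [PySem.Str.pyGet?_natCast] at hc
  simp [hc]

lemma step_groups (s : List String) (j : Nat) (G : List (List String))
    (hG : pvGroupsInv s j G) :
    pvGroupsInv s (j + 1) (G.flatMap (pvV j)) := by
  obtain ⟨hGa, hGb⟩ := hG
  constructor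
  · intro g' hg'
    obtain ⟨g, hgG, hg'V⟩ := List.mem_flatMap.mp hg'
    obtain ⟨_, p, hp, hgcls⟩ := hGa g hgG
    rw [hgcls, pvV_eq hp] at hg'V
    obtain ⟨c, hc, hceq⟩ := List.mem_map.mp hg'V
    obtain ⟨t, ht, htc⟩ := List.mem_map.mp ((PySem.Set.mem_ofList _ _).mp hc)
    have htmem : t ∈ pvCls s (j + 1) (p ++ [c]) := mem_bucket hp c ht htc
    refine ⟨List.ne_nil_of_mem (hceq ▸ htmem), p ++ [c], by simp [hp], hceq.symm⟩
  · intro u hu hlen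
    obtain ⟨g, hgG, hug⟩ := hGb u hu (by omega)
    obtain ⟨_, p, hp, hgcls⟩ := hGa g hgG
    have hual : u ∈ (pvCls s j p).filter (fun t => !decide (t.toList.length ≤ j)) := by
      refine List.mem_filter.mpr ⟨hgcls ▸ hug, by simp only [Bool.not_eq_eq_eq_not, Bool.not_true, decide_eq_false_iff_not]; omega⟩
    set c := (PySem.Str.pyGet? u (j : Int)).getD ' ' with hcdef
    have hcmem : c ∈ PySem.Set.ofList
        (((pvCls s j p).filter (fun t => !decide (t.toList.length ≤ j))).map
          (fun t => (PySem.Str.pyGet? t (j : Int)).getD ' ')) :=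
      (PySem.Set.mem_ofList _ _).mpr (List.mem_map_of_mem hual)
    refine ⟨pvCls s (j + 1) (p ++ [c]), ?_, mem_bucket hp c hual rfl⟩
    apply List.mem_flatMap.mpr
    refine ⟨g, hgG, ?_⟩
    rw [hgcls, pvV_eq hp]
    exact List.mem_map_of_mem hcmem
lemma step_max (s : List String) (hne : s ≠ []) (j : Nat) (b' : Int) (G' : List (List String))
    (hB : pvBestInv s (j + 1) b') (hG : pvGroupsInv s (j + 1) G') :
    pvIsMax (pvKs s j) (G'.foldl (fun lb g => max lb ((g.length : Int))) b') := by
  obtain ⟨hb0, hbd, hbw⟩ := hB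
  obtain ⟨hGa, hGb⟩ := hG
  have hle := PySem.List.le_foldl_max_int G' (fun g => ((g.length : Nat) : Int)) b'
  set v := G'.foldl (fun lb g => max lb ((g.length : Int))) b' with hv
  -- every class of a long string is some group of G'
  have hclsG : ∀ u ∈ s, j + 1 ≤ u.toList.length → pvCls s (j+1) (u.toList.take (j+1)) ∈ G' := by
    intro u hu hlen
    obtain ⟨g', hg'G, hug'⟩ := hGb u hu hlen
    obtain ⟨_, p', hp', hcls⟩ := hGa g' hg'G
    have : u.toList.take (j+1) = p' := (mem_pvCls.mp (hcls ▸ hug')).2.2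
    rw [this, ← hcls]
    exact hg'G
  -- upper bound: every key multiplicity is at most v
  have hupper : ∀ k ∈ pvKs s j, ((pvKs s j).count k : Int) ≤ v := by
    intro k hk
    obtain ⟨u, hu, hk⟩ := List.mem_map.mp hk
    by_cases hlen : u.toList.length ≤ j
    · rw [← hk, pvKey_short hlen, count_key_short s hlen]
      exact le_trans (hbd u hu (by omega)) hle.1
    · rw [← hk, count_key_long s (by omega)]
      exact hle.2 _ (hclsG u hu (by omega))
  -- v is at least 1
  obtain ⟨u0, hu0⟩ := List.exists_mem_of_ne_nil s hne
  have hv1 : 1 ≤ v := by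
    by_cases hlen : u0.toList.length ≤ j
    · have h1 : (1 : Int) ≤ (s.count u0 : Int) := by
        have := List.count_pos_iff.mpr hu0
        omega
      exact le_trans (le_trans h1 (hbd u0 hu0 (by omega))) hle.1
    · have hg := hclsG u0 hu0 (by omega)
      have hmem : u0 ∈ pvCls s (j+1) (u0.toList.take (j+1)) :=
        mem_pvCls.mpr ⟨hu0, by omega, rfl⟩
      have := hle.2 _ hg
      have hlp : 1 ≤ ((pvCls s (j+1) (u0.toList.take (j+1))).length : Int) := by
        have := List.length_pos_of_mem hmem
        omega
      omega
  constructor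
  · -- v is an achieved multiplicity
    have hmem : v = b' ∨ v ∈ G'.map (fun g => ((g.length : Nat) : Int)) := by
      rw [hv, ← List.foldl_map]
      exact PySem.List.foldl_max_mem _ _
    rcases hmem with h | h
    · rcases hbw with h0 | ⟨u, hu, hlen, he⟩
      · omega
      · refine ⟨pvKey j u, List.mem_map_of_mem hu, ?_⟩
        rw [pvKey_short (by omega), count_key_short s (by omega)]
        omega
    · obtain ⟨g', hg'G, hge⟩ := List.mem_map.mp h
      obtain ⟨hg'ne, p', hp', hcls⟩ := hGa g' hg'G
      obtain ⟨t, ht⟩ := List.exists_mem_of_ne_nil g' hg'ne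
      have htc := mem_pvCls.mp (hcls ▸ ht)
      refine ⟨pvKey j t, List.mem_map_of_mem htc.1, ?_⟩
      rw [count_key_long s (by omega)]
      rw [htc.2.2, ← hcls]
      omega
  · exact hupper

lemma level_fold_eq (G' : List (List String)) (b' : Int) :
    G'.foldl (fun lb g => if (g.length : Int) > lb then (g.length : Int) else lb) b'
      = G'.foldl (fun lb g => max lb ((g.length : Int))) b' := by
  congr 1
  funext lb g
  exact if_gt_eq_max lb ((g.length : Int))

lemma pvCls_zero (s : List String) : pvCls s 0 [] = s := by
  unfold pvCls
  simp

lemma B_loop (s : List String) (hne : s ≠ []) (n : Nat) :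
    ∃ b G,
      (((List.range n).map (fun k => ((k : Nat) : Int))).foldl
        (fun (st : List Int × Int × List (List String)) depth =>
          let result := st.1
          let best_ended := st.2.1
          let groups := st.2.2
          let bg :=
            groups.foldl
              (fun (acc : Int × List (List String)) g =>
                let be :=
                  g.foldl
                    (fun (be : PySem.Dict Char (List String) × Int) t =>
                      if PySem.Str.len t ≤ depth then (be.1, be.2 + 1)
                      else (be.1.modify ((PySem.Str.pyGet? t depth).getD ' ') [] (· ++ [t]), be.2))
                    (PySem.Dict.empty, 0)
                (if be.2 > acc.1 then be.2 else acc.1, acc.2 ++ be.1.values))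
              (best_ended, [])
          let new_groups := bg.2
          let level_best :=
            new_groups.foldl
              (fun lb g => if (g.length : Int) > lb then (g.length : Int) else lb) bg.1
          (result ++ [level_best], bg.1, new_groups))
        ([], 0, [s]))
      = ((List.range n).map (fun d => pvAval s d), b, G)
      ∧ pvBestInv s n b ∧ pvGroupsInv s n G := by
  induction n with
  | zero =>
    refine ⟨0, [s], by simp, ⟨le_refl 0, fun u hu h => absurd h (by omega), Or.inl rfl⟩, ?_, ?_⟩
    · intro g hg
      rw [List.mem_singleton] at hg
      rw [hg]
      exact ⟨hne, [], rfl, (pvCls_zero s).symm⟩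
    · intro u hu _
      exact ⟨s, List.mem_singleton.mpr rfl, hu⟩
  | succ n ih =>
    obtain ⟨b, G, heq, hB, hG⟩ := ih
    rw [List.range_succ, List.map_append, List.foldl_append, heq]
    simp only [List.map_cons, List.map_nil, List.foldl_cons, List.foldl_nil]
    refine ⟨G.foldl (fun a g => max a (pvE n g)) b, G.flatMap (pvV n), ?_,
      step_best s n b G hB hG, step_groups s n G hG⟩
    show ((List.range n).map (fun d => pvAval s d) ++ [_], _, _) = _
    rw [body_eq n b G]
    have h1 := step_max s hne n _ _ (step_best s n b G hB hG) (step_groups s n G hG)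
    have h2 := pvAval_isMax s hne n
    have hlev : ((G.foldl (fun a g => max a (pvE n g)) b, G.flatMap (pvV n)).2).foldl
        (fun lb g => if (g.length : Int) > lb then (g.length : Int) else lb)
        ((G.foldl (fun a g => max a (pvE n g)) b, G.flatMap (pvV n)).1) = pvAval s n := by
      show (G.flatMap (pvV n)).foldl _ (G.foldl (fun a g => max a (pvE n g)) b) = _
      rw [level_fold_eq]
      exact pvIsMax_unique h1 h2
    rw [hlev, List.map_append, List.map_cons, List.map_nil]

lemma B_char (s0 : String) (t : List String) :
    findDominance_alt (s0 :: t) =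
      (List.range s0.toList.length).map (fun d => pvAval (s0 :: t) d) := by
  show ((PySem.List.pyRange 0 (PySem.Str.len s0) 1).foldl _ ([], 0, [s0 :: t])).1 = _
  rw [PySem.List.pyRange_one]
  rw [show (PySem.Str.len s0 - 0) = ((s0.toList.length : Nat) : Int) from by
        rw [PySem.Str.len_eq]; ring]
  rw [Int.toNat_natCast]
  have hmap : (List.range s0.toList.length).map (fun k => (0 : Int) + (k : Nat)) =
      (List.range s0.toList.length).map (fun k => ((k : Nat) : Int)) := by
    apply List.map_congr_left; intro k _; ring
  rw [hmap]
  obtain ⟨b, G, heq, _, _⟩ := B_loop (s0 :: t) (by simp) s0.toList.length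
  rw [heq]

-- ===== VERDICT (by name: the statement is the Claim_ definition above) =====
theorem findDominance_spec : Claim_equal_findDominance := by
  intro s _ hpre
  unfold Spec_findDominance
  match s with
  | [] => exact absurd rfl hpre
  | s0 :: t => rw [A_char, B_char]
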